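-- pv_equiv track=rewrite | github.com/RocqDojo/coqtail-scripts | tester.py | parse_goal
-- ===== SOURCE A (Python) =====
-- def parse_goal(msg: str) -> tuple[list[str], list[str]]:
--     """
--     parse the local context the conclusion line from [Show.] output
--     """
--
--     # skip the 'goal 1 is:' line
--     msg_lines = msg.splitlines()[1:]
--     hypothesis: list[str] = []
--     conclusion: list[str] = []
--     seen_separator = False
--
--     for line in msg_lines:
--         line = line.strip()
--         # skip empty lines
--         if len(line) == 0:
--             continue
--         # detect the ===== line
--         if line.startswith("==="):
--             seen_separator = True
--             continue
--         if seen_separator: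
--             conclusion.append(line)
--         else:
--             hypothesis.append(line)
--     return hypothesis, conclusion
-- ===== SOURCE B (Python) =====
-- def parse_goal(msg: str) -> tuple[list[str], list[str]]:
--     # strip all lines after the skipped first one, locate the first '===' separator,
--     # then split/filter around that index instead of scanning with a flag
--     lines = [l.strip() for l in msg.splitlines()[1:]]
--     sep = next((i for i, l in enumerate(lines) if l.startswith("===")), None)
--     if sep is None:
--         return [l for l in lines if l], []
--     return ([l for l in lines[:sep] if l],
--             [l for l in lines[sep + 1:] if l and not l.startswith("===")])
-- ===== Notes on version B (the rewrite author's own statement) =====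
-- stated objective: alternative
-- what changed: Replaces A's single stateful scan with a seen-separator flag by stripping all lines up front, locating the first separator line with an index search, and building hypothesis/conclusion as filters of the slices before and after that index.
import Mathlib
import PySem

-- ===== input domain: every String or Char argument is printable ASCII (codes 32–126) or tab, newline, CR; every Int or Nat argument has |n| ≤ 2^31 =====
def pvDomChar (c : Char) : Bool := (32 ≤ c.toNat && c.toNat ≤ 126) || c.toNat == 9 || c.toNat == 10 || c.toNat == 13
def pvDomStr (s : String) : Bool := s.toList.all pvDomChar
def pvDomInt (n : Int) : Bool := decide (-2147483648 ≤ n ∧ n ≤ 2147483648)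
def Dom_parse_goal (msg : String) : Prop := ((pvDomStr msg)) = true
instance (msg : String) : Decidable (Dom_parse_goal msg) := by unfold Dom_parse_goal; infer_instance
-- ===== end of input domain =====

-- B replaces A's stateful flag-scan by an up-front strip, an index search for the first '===' line,
-- and filters of the slices around it (alternative decomposition, same cost).


-- ===== PORT A =====
-- A's for-loop: state (hypothesis, conclusion, seen_separator), strip each line inside the loop
def parse_goalGo : List String → List String → List String → Bool → List String × List String
  | [], hyp, concl, _ => (hyp, concl)
  | line :: rest, hyp, concl, seen =>
    let l := PySem.Str.strip line
    if PySem.Str.len l == 0 then parse_goalGo rest hyp concl seen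
    else if PySem.Str.startswith l "===" then parse_goalGo rest hyp concl true
    else if seen then parse_goalGo rest hyp (concl ++ [l]) seen
    else parse_goalGo rest (hyp ++ [l]) concl seen

def parse_goal (msg : String) : List String × List String :=
  parse_goalGo (PySem.List.slice (PySem.Str.splitlines msg) (some 1) none) [] [] false

-- ===== PORT B =====
def pgKeep (l : String) : Bool := PySem.Str.len l != 0          -- Python truthiness 'if l'
def pgSep (l : String) : Bool := PySem.Str.startswith l "==="

def parse_goal_alt (msg : String) : List String × List String :=
  let lines := (PySem.List.slice (PySem.Str.splitlines msg) (some 1) none).map PySem.Str.strip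
  match lines.findIdx? pgSep with
  | none => (lines.filter pgKeep, [])
  | some i => ((lines.take i).filter pgKeep,
               (lines.drop (i + 1)).filter (fun l => pgKeep l && !pgSep l))

-- ===== PRECONDITION & SPEC =====
def Spec_parse_goal (msg : String) (out : List String × List String) : Prop := out = parse_goal_alt msg
instance (msg : String) (out : List String × List String) : Decidable (Spec_parse_goal msg out) := by unfold Spec_parse_goal; infer_instance

-- ===== CLAIM (what is proved, stated in full; the proofs are below) =====
def Claim_equal_parse_goal : Prop := ∀ (msg : String), Dom_parse_goal msg → Spec_parse_goal msg (parse_goal msg)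

-- ===== LEMMAS AND PROOFS =====

-- the loop's emptiness test, in List Char form
theorem strip_empty_iff (line : String) :
    PySem.Str.len (PySem.Str.strip line) = 0 ↔ PySem.Chars.strip line.toList = [] := by
  simp [PySem.Str.len_eq]

-- A's loop after the separator appends exactly the filtered remainder
theorem goA_true (ls hyp concl : List String) :
    parse_goalGo ls hyp concl true
      = (hyp, concl ++ (ls.map PySem.Str.strip).filter (fun l => pgKeep l && !pgSep l)) := by
  induction ls generalizing hyp concl with
  | nil => simp [parse_goalGo]
  | cons line rest ih =>
    simp only [parse_goalGo, List.map_cons, List.filter_cons]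
    by_cases h0 : PySem.Str.len (PySem.Str.strip line) = 0
    · have he := (strip_empty_iff line).mp h0
      simp [pgKeep, pgSep, he, ih]
    · have hne : ¬ PySem.Chars.strip line.toList = [] := fun c => h0 ((strip_empty_iff line).mpr c)
      by_cases hsep : PySem.Str.startswith (PySem.Str.strip line) "===" = true
      · have hsw : PySem.Chars.startswith (PySem.Chars.strip line.toList) ['=', '=', '='] = true := by
          simpa using hsep
        simp [pgKeep, pgSep, hne, hsw, ih]
      · have hsw : PySem.Chars.startswith (PySem.Chars.strip line.toList) ['=', '=', '='] = false := by
          simpa using hsep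
        simp [pgKeep, pgSep, hne, hsw, ih]

-- A's loop before the separator equals B's index-split computation
theorem goA_false (ls hyp concl : List String) :
    parse_goalGo ls hyp concl false
      = match (ls.map PySem.Str.strip).findIdx? pgSep with
        | none => (hyp ++ (ls.map PySem.Str.strip).filter pgKeep, concl)
        | some i => (hyp ++ ((ls.map PySem.Str.strip).take i).filter pgKeep,
                     concl ++ ((ls.map PySem.Str.strip).drop (i + 1)).filter (fun l => pgKeep l && !pgSep l)) := by
  induction ls generalizing hyp concl with
  | nil => simp [parse_goalGo]
  | cons line rest ih =>
    simp only [parse_goalGo, List.map_cons, List.findIdx?_cons]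
    by_cases h0 : PySem.Str.len (PySem.Str.strip line) = 0
    · have he := (strip_empty_iff line).mp h0
      have hsf : PySem.Chars.startswith ([] : List Char) ['=', '=', '='] = false := by decide
      rw [ih]
      cases hfi : (rest.map PySem.Str.strip).findIdx? pgSep with
      | none => simp [pgKeep, pgSep, he, hsf]
      | some i => simp [pgKeep, pgSep, he, hsf]
    · have hne : ¬ PySem.Chars.strip line.toList = [] := fun c => h0 ((strip_empty_iff line).mpr c)
      by_cases hsep : PySem.Str.startswith (PySem.Str.strip line) "===" = true
      · have hsw : PySem.Chars.startswith (PySem.Chars.strip line.toList) ['=', '=', '='] = true := by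
          simpa using hsep
        rw [goA_true]
        simp [pgKeep, pgSep, hne, hsw]
      · have hsw : PySem.Chars.startswith (PySem.Chars.strip line.toList) ['=', '=', '='] = false := by
          simpa using hsep
        cases hfi : (rest.map PySem.Str.strip).findIdx? pgSep with
        | none => simp [pgKeep, pgSep, hfi, hne, hsw, ih]
        | some i => simp [pgKeep, pgSep, hfi, hne, hsw, ih]

-- ===== VERDICT (by name: the statement is the Claim_ definition above) =====
theorem parse_goal_spec : Claim_equal_parse_goal := by
  intro msg _
  unfold Spec_parse_goal parse_goal parse_goal_alt
  rw [goA_false]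
  cases h : ((PySem.List.slice (PySem.Str.splitlines msg) (some 1) none).map PySem.Str.strip).findIdx? pgSep <;> simp [h]
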